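-- pv_equiv track=rewrite | github.com/hadikhamoud/Miettes-D-art | templates/miettes/ranam.py | isBivalued
-- ===== SOURCE A (Python) =====
-- def isBivalued(L):
--     if len(L)<=2:
--         return True
--
--     else:
--         a = L[0]
--         b= L[1]
--
--         if a==b:
--             for i in range(2,len(L)):
--                 if L[i]!=b:
--                     b=L[i]
--                     break
--
--         for i in range(2,len(L)):
--             if L[i]!=a and L[i]!=b:
--                 return False
--         return True
-- ===== SOURCE B (Python) =====
-- def isBivalued(L):
--     seen = []
--     for x in L:
--         if all(x != s for s in seen):
--             seen.append(x)
--             if len(seen) > 2: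
--                 return False
--     return True
-- ===== Notes on version B (the rewrite author's own statement) =====
-- stated objective: simpler
-- what changed: Replaces A's fixed two-candidate selection (pick L[0], L[1], re-pick b if equal, then re-scan) with a single pass maintaining an accumulator of distinct values seen so far, returning False as soon as a third distinct value appears.
import Mathlib
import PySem

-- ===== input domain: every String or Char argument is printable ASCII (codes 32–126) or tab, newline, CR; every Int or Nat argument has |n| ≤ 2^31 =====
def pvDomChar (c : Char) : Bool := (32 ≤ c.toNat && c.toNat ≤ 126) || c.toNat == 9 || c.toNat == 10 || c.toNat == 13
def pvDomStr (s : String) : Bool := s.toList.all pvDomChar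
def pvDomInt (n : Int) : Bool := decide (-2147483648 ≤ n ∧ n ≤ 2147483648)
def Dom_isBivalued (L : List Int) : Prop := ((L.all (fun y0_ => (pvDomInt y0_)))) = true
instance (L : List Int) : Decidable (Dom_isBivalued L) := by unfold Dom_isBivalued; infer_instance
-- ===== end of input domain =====

-- B replaces A's fixed two-candidate selection with a single pass keeping an accumulator of distinct values (same O(n) cost, plainer).


-- ===== PORT A =====
-- first loop of A: find the first element ≠ b (the new b), else keep b
def pvFindB (b : Int) : List Int → Int
  | [] => b
  | x :: xs => if x ≠ b then x else pvFindB b xs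

-- second loop of A: every element must equal a or b
def pvCheck (a b : Int) : List Int → Bool
  | [] => true
  | x :: xs => if x ≠ a ∧ x ≠ b then false else pvCheck a b xs

def isBivalued (L : List Int) : Bool :=
  match L with
  | _ :: _ :: [] => true            -- len(L) <= 2
  | x :: y :: rest2 =>              -- a := L[0]; b := L[1], re-picked by the first loop if a == b
      pvCheck x (if x = y then pvFindB y rest2 else y) rest2
  | _ => true                       -- len(L) <= 2

-- ===== PORT B =====
-- B's single loop: seen = distinct values so far; early False on a third one
def pvAltLoop (seen : List Int) : List Int → Bool
  | [] => true
  | x :: xs =>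
      if seen.all (fun s => decide (x ≠ s)) then
        (if (seen ++ [x]).length > 2 then false else pvAltLoop (seen ++ [x]) xs)
      else pvAltLoop seen xs

def isBivalued_alt (L : List Int) : Bool := pvAltLoop [] L

-- ===== PRECONDITION & SPEC =====
def Spec_isBivalued (L : List Int) (out : Bool) : Prop := out = isBivalued_alt L
instance (L : List Int) (out : Bool) : Decidable (Spec_isBivalued L out) := by unfold Spec_isBivalued; infer_instance

-- ===== CLAIM (what is proved, stated in full; the proofs are below) =====
def Claim_equal_isBivalued : Prop := ∀ (L : List Int), Dom_isBivalued L → Spec_isBivalued L (isBivalued L)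

-- ===== LEMMAS AND PROOFS =====

-- distinct-value accumulator (proof artifact only)
def pvAcc (s : List Int) : List Int → List Int
  | [] => s
  | x :: xs => if x ∈ s then pvAcc s xs else pvAcc (s ++ [x]) xs

theorem pvAcc_mono (xs : List Int) : ∀ (s : List Int), s.length ≤ (pvAcc s xs).length := by
  induction xs with
  | nil => intro s; simp [pvAcc]
  | cons x xs ih =>
      intro s
      simp only [pvAcc]
      split
      · exact ih s
      · have := ih (s ++ [x])
        simp at this
        omega

theorem pvAcc_len_eq (xs : List Int) : ∀ (s : List Int),
    ((pvAcc s xs).length ≤ s.length ↔ ∀ e ∈ xs, e ∈ s) := by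
  induction xs with
  | nil => intro s; simp [pvAcc]
  | cons x xs ih =>
      intro s
      simp only [pvAcc]
      split
      · rename_i hx
        rw [ih s]
        constructor
        · intro h e he
          rcases List.mem_cons.mp he with he1 | he1
          · exact he1 ▸ hx
          · exact h e he1
        · intro h e he; exact h e (List.mem_cons_of_mem _ he)
      · rename_i hx
        constructor
        · intro h
          have := pvAcc_mono xs (s ++ [x])
          simp at this
          omega
        · intro h
          exact absurd (h x List.mem_cons_self) hx

theorem pvCheck_iff (a b : Int) (xs : List Int) :
    pvCheck a b xs = true ↔ ∀ e ∈ xs, e = a ∨ e = b := by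
  induction xs with
  | nil => simp [pvCheck]
  | cons x xs ih =>
      simp only [pvCheck]
      split
      · rename_i h
        simp only [Bool.false_eq_true, false_iff]
        intro hall
        rcases hall x List.mem_cons_self with h1 | h1 <;> tauto
      · rename_i h
        rw [ih]
        constructor
        · intro hall e he
          rcases List.mem_cons.mp he with he1 | he1
          · subst he1
            by_cases hxa : e = a
            · exact Or.inl hxa
            · exact Or.inr (by tauto)
          · exact hall e he1
        · intro hall e he; exact hall e (List.mem_cons_of_mem _ he)

-- generic bridge: a Bool-valued check equals decide of the ≤-2 accumulator bound
theorem pvCheck_eq_decide (a b : Int) (l : List Int) :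
    pvCheck a b l = decide ((pvAcc [a, b] l).length ≤ 2) := by
  rw [Bool.eq_iff_iff, pvCheck_iff, decide_eq_true_iff]
  have h := pvAcc_len_eq l [a, b]
  have hm := pvAcc_mono l [a, b]
  simp only [List.length_cons, List.length_nil] at h hm ⊢
  constructor
  · intro hall
    have := h.mpr (by intro e he; simpa using hall e he)
    omega
  · intro hle e he
    have := h.mp (by omega) e he
    simpa using this

-- B's loop computes: distinct count stays ≤ 2
theorem pvAltLoop_eq (xs : List Int) : ∀ (seen : List Int), seen.length ≤ 2 →
    pvAltLoop seen xs = decide ((pvAcc seen xs).length ≤ 2) := by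
  induction xs with
  | nil => intro seen h; simp [pvAltLoop, pvAcc, h]
  | cons x xs ih =>
      intro seen h
      by_cases hmem : x ∈ seen
      · have h1 : pvAltLoop seen (x :: xs) = pvAltLoop seen xs := by
          have : (seen.all (fun s => decide (x ≠ s))) = false := by
            simp only [List.all_eq_false]
            exact ⟨x, hmem, by simp⟩
          simp only [pvAltLoop, this, Bool.false_eq_true, if_false]
        have h2 : pvAcc seen (x :: xs) = pvAcc seen xs := by
          simp [pvAcc, hmem]
        rw [h1, h2]; exact ih seen h
      · have hall : (seen.all (fun s => decide (x ≠ s))) = true := by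
          simp only [List.all_eq_true]
          intro s hs
          simp only [decide_eq_true_iff]
          intro he; exact hmem (he ▸ hs)
        have h2 : pvAcc seen (x :: xs) = pvAcc (seen ++ [x]) xs := by
          simp [pvAcc, hmem]
        rw [h2]
        by_cases hlen : (seen ++ [x]).length > 2
        · have hm := pvAcc_mono xs (seen ++ [x])
          have hA : pvAltLoop seen (x :: xs) = false := by
            simp only [pvAltLoop, hall, if_true]
            rw [if_pos hlen]
          rw [hA]
          symm
          simp only [decide_eq_false_iff_not]
          omega
        · have hA : pvAltLoop seen (x :: xs) = pvAltLoop (seen ++ [x]) xs := by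
            simp only [pvAltLoop, hall, if_true]
            rw [if_neg hlen]
          rw [hA]
          exact ih (seen ++ [x]) (by omega)

-- A's first loop + check, for the case L[0] = L[1]
theorem pvA_eq_case (x : Int) (l : List Int) :
    pvCheck x (pvFindB x l) l = decide ((pvAcc [x] l).length ≤ 2) := by
  induction l with
  | nil => simp [pvCheck, pvFindB, pvAcc]
  | cons z q ih =>
      by_cases hz : z = x
      · subst hz
        have h1 : pvFindB z (z :: q) = pvFindB z q := by simp [pvFindB]
        have h2 : ∀ b, pvCheck z b (z :: q) = pvCheck z b q := by
          intro b; simp [pvCheck]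
        have h3 : pvAcc [z] (z :: q) = pvAcc [z] q := by simp [pvAcc]
        rw [h1, h2, h3]; exact ih
      · have h1 : pvFindB x (z :: q) = z := by simp [pvFindB, hz]
        have h2 : pvCheck x z (z :: q) = pvCheck x z q := by simp [pvCheck]
        have h3 : pvAcc [x] (z :: q) = pvAcc [x, z] q := by simp [pvAcc, hz]
        rw [h1, h2, h3]
        exact pvCheck_eq_decide x z q

-- ===== VERDICT (by name: the statement is the Claim_ definition above) =====
theorem isBivalued_spec : Claim_equal_isBivalued := by
  intro L _
  unfold Spec_isBivalued isBivalued_alt isBivalued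
  match L with
  | [] => simp [pvAltLoop]
  | [x] => simp [pvAltLoop, pvAcc]
  | [x, y] =>
      rw [pvAltLoop_eq _ [] (by simp)]
      by_cases h : y = x <;> simp [pvAcc, h]
  | x :: y :: z :: rest =>
      rw [pvAltLoop_eq _ [] (by simp)]
      by_cases hxy : x = y
      · subst hxy
        have hacc : pvAcc [] (x :: x :: z :: rest) = pvAcc [x] (z :: rest) := by
          simp [pvAcc]
        rw [hacc]
        show pvCheck x (if x = x then pvFindB x (z :: rest) else x) (z :: rest) = _
        rw [if_pos rfl]
        exact pvA_eq_case x (z :: rest)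
      · have hacc : pvAcc [] (x :: y :: z :: rest) = pvAcc [x, y] (z :: rest) := by
          simp [pvAcc, Ne.symm hxy]
        rw [hacc]
        show pvCheck x (if x = y then pvFindB y (z :: rest) else y) (z :: rest) = _
        rw [if_neg hxy]
        exact pvCheck_eq_decide x y (z :: rest)
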